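-- pv_equiv track=rewrite | github.com/rajanaibot2025-ship-it/rajan-ai-max | indicators.py | check_trend
-- ===== SOURCE A (Python) =====
-- def check_trend(candle_list):
--     bullish = sum(1 for c in candle_list if c["close"] > c["open"])
--     bearish = sum(1 for c in candle_list if c["open"] > c["close"])
--     if bullish > bearish:
--         return "uptrend"
--     elif bearish > bullish:
--         return "downtrend"
--     else:
--         return "sideways"
-- ===== SOURCE B (Python) =====
-- def check_trend(candle_list):
--     # Cancellation stack: each bullish candle pushes +1, each bearish candle
--     # pushes -1, except that an opposite sign on top of the stack is cancelled
--     # (popped) instead.  The stack ends up homogeneous: its top sign (or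
--     # emptiness) decides the trend.
--     stack = []
--     for c in candle_list:
--         o = c["open"]
--         cl = c["close"]
--         if cl > o:
--             s = 1
--         elif o > cl:
--             s = -1
--         else:
--             continue
--         if stack and stack[-1] != s:
--             stack.pop()
--         else:
--             stack.append(s)
--     if not stack:
--         return "sideways"
--     return "uptrend" if stack[-1] == 1 else "downtrend"
-- ===== Notes on version B (the rewrite author's own statement) =====
-- stated objective: alternative
-- what changed: Replaces A's two counting passes with a single-pass cancellation stack: a bullish candle pushes +1 and a bearish one -1, except an opposite sign on top is popped (cancelled); the surviving sign on top, or an empty stack, decides the trend.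
import Mathlib
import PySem

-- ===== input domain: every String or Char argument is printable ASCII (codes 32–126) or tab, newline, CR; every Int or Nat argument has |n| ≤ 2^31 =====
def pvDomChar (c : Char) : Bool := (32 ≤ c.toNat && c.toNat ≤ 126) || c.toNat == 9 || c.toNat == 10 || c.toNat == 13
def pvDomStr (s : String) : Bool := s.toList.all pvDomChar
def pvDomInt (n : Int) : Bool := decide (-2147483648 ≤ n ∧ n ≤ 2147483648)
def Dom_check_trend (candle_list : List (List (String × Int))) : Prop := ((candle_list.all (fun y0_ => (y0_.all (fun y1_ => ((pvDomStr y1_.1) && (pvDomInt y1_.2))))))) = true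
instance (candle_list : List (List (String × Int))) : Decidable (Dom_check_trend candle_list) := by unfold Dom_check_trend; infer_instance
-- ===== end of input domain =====

-- B replaces A's two counting passes with a single-pass cancellation stack:
-- bullish pushes +1, bearish pushes -1, an opposite sign on top is popped;
-- the surviving top sign (or an empty stack) decides the trend.


-- ===== PORT A =====
-- c["close"] > c["open"]; dict lookup = first match in the association list.
-- A missing key (KeyError) is excluded by Pre_check_trend; the 'false' arms are unreachable there.
def pvCloseGtOpen (c : List (String × Int)) : Bool :=
  match c.lookup "close", c.lookup "open" with
  | some cl, some op => decide (op < cl)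
  | _, _ => false

def pvOpenGtClose (c : List (String × Int)) : Bool :=
  match c.lookup "open", c.lookup "close" with
  | some op, some cl => decide (cl < op)
  | _, _ => false

def check_trend (candle_list : List (List (String × Int))) : String :=
  let bullish : Int := candle_list.foldl (fun acc c => if pvCloseGtOpen c then acc + 1 else acc) 0
  let bearish : Int := candle_list.foldl (fun acc c => if pvOpenGtClose c then acc + 1 else acc) 0
  if bullish > bearish then "uptrend"
  else if bearish > bullish then "downtrend"
  else "sideways"

-- ===== PORT B =====
-- The sign s of one candle (0 on a tie = Python's 'continue'; the 'none' arm is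
-- unreachable under Pre_check_trend, matching Source B which would raise KeyError there).
def pvSignB (c : List (String × Int)) : Int :=
  match c.lookup "open", c.lookup "close" with
  | some o, some cl => if o < cl then 1 else if cl < o then -1 else 0
  | _, _ => 0

-- one iteration of Source B's loop; the head of the Lean list is Python's stack[-1]
def pvStepB (st : List Int) (c : List (String × Int)) : List Int :=
  let s := pvSignB c
  if s = 0 then st
  else
    match st with
    | t :: rest => if t ≠ s then rest else s :: t :: rest
    | [] => [s]

def check_trend_alt (candle_list : List (List (String × Int))) : String :=
  let stack := candle_list.foldl pvStepB []
  match stack with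
  | [] => "sideways"
  | t :: _ => if t = 1 then "uptrend" else "downtrend"

-- ===== PRECONDITION & SPEC =====
-- Pre_: every candle has both "close" and "open" keys; otherwise A (and B) raise KeyError.
def Pre_check_trend (candle_list : List (List (String × Int))) : Prop :=
  ∀ c ∈ candle_list, (c.lookup "close").isSome ∧ (c.lookup "open").isSome
instance (candle_list : List (List (String × Int))) : Decidable (Pre_check_trend candle_list) := by
  unfold Pre_check_trend; infer_instance
def pvWitness_check_trend : (List (List (String × Int))) :=
  [[("open", 1), ("close", 2)], [("open", 3), ("close", 3)]]
def Spec_check_trend (candle_list : List (List (String × Int))) (out : String) : Prop := out = check_trend_alt candle_list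
instance (candle_list : List (List (String × Int))) (out : String) : Decidable (Spec_check_trend candle_list out) := by unfold Spec_check_trend; infer_instance

-- ===== CLAIM (what is proved, stated in full; the proofs are below) =====
def Claim_equal_check_trend : Prop := ∀ (candle_list : List (List (String × Int))), Dom_check_trend candle_list → Pre_check_trend candle_list → Spec_check_trend candle_list (check_trend candle_list)

-- ===== LEMMAS AND PROOFS =====
-- canonical stack of net value m: m copies of +1, or (-m) copies of -1
def pvRepr (m : Int) : List Int :=
  if 0 ≤ m then List.replicate m.toNat 1 else List.replicate (-m).toNat (-1)

theorem pvSignB_cases (c : List (String × Int)) :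
    pvSignB c = 1 ∨ pvSignB c = 0 ∨ pvSignB c = -1 := by
  unfold pvSignB
  cases c.lookup "open" <;> cases c.lookup "close" <;> simp
  split_ifs <;> simp <;> omega

-- one loop step maps the canonical stack of m to the canonical stack of m + s
theorem pvStepB_repr (m : Int) (c : List (String × Int)) :
    pvStepB (pvRepr m) c = pvRepr (m + pvSignB c) := by
  rcases pvSignB_cases c with hs | hs | hs <;> unfold pvStepB pvRepr <;> rw [hs]
  · by_cases hm : 0 ≤ m
    · rcases Nat.eq_zero_or_pos m.toNat with h0 | h0
      · simp [h0, hm, show (0:Int) ≤ m + 1 by omega, show (m+1).toNat = 1 by omega]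
      · obtain ⟨k, hk⟩ : ∃ k, m.toNat = k + 1 := ⟨m.toNat - 1, by omega⟩
        simp [hm, hk, show (0:Int) ≤ m + 1 by omega, show (m+1).toNat = k + 2 by omega,
          List.replicate_succ]
    · obtain ⟨k, hk⟩ : ∃ k, (-m).toNat = k + 1 := ⟨(-m).toNat - 1, by omega⟩
      by_cases hm1 : 0 ≤ m + 1
      · simp [hm, hk, hm1, List.replicate_succ, show (m+1).toNat = k by omega, show k = 0 by omega]
      · simp [hm, hk, hm1, List.replicate_succ]
        omega
  · simp
  · by_cases hm : 0 ≤ m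
    · rcases Nat.eq_zero_or_pos m.toNat with h0 | h0
      · simp [h0, hm, show ¬ (0:Int) ≤ m + -1 by omega]
        rw [show (1 + -m).toNat = 1 by omega, List.replicate_one]
      · obtain ⟨k, hk⟩ : ∃ k, m.toNat = k + 1 := ⟨m.toNat - 1, by omega⟩
        by_cases hm1 : 0 ≤ m + -1
        · simp [hm, hk, hm1, List.replicate_succ, show (m + -1).toNat = k by omega]
        · simp [hm, hk, hm1, List.replicate_succ]
          omega
    · obtain ⟨k, hk⟩ : ∃ k, (-m).toNat = k + 1 := ⟨(-m).toNat - 1, by omega⟩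
      simp [hm, hk, show ¬ (0:Int) ≤ m + -1 by omega, List.replicate_succ]
      rw [show (1 + -m).toNat = k + 2 by omega, List.replicate_succ, List.replicate_succ]

-- Source B's whole loop, started on a canonical stack, ends on the canonical stack of m + net
theorem pvFoldB_repr (l : List (List (String × Int))) (m : Int) :
    l.foldl pvStepB (pvRepr m) = pvRepr (m + (l.map pvSignB).sum) := by
  induction l generalizing m with
  | nil => simp
  | cons c t ih =>
    simp only [List.foldl, List.map, List.sum_cons]
    rw [pvStepB_repr, ih]
    ring_nf

-- A's bullish count minus its bearish count is the sum of the per-candle signs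
theorem pvCounts_sub (l : List (List (String × Int))) (b r : Int) :
    l.foldl (fun acc c => if pvCloseGtOpen c then acc + 1 else acc) b
      - l.foldl (fun acc c => if pvOpenGtClose c then acc + 1 else acc) r
    = (b - r) + (l.map pvSignB).sum := by
  induction l generalizing b r with
  | nil => simp
  | cons c t ih =>
    simp only [List.foldl, List.map, List.sum_cons]
    have hsign : pvSignB c =
        (if pvCloseGtOpen c then (1:Int) else 0) - (if pvOpenGtClose c then (1:Int) else 0) := by
      unfold pvSignB pvCloseGtOpen pvOpenGtClose
      cases c.lookup "open" <;> cases c.lookup "close" <;> simp <;> split_ifs <;> simp_all <;> omega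
    split_ifs with h1 h2 h2 <;> rw [ih] <;> simp [h1, h2] at hsign <;> omega

-- ===== VERDICT (by name: the statement is the Claim_ definition above) =====
theorem check_trend_spec : Claim_equal_check_trend := by
  intro l _ _
  unfold Spec_check_trend check_trend check_trend_alt
  have hstack : l.foldl pvStepB [] = pvRepr ((l.map pvSignB).sum) := by
    have := pvFoldB_repr l 0
    simpa [pvRepr] using this
  have hdiff := pvCounts_sub l 0 0
  rw [hstack]
  set net := (l.map pvSignB).sum with hnet
  set b := l.foldl (fun acc c => if pvCloseGtOpen c then acc + 1 else acc) (0:Int)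
  set r := l.foldl (fun acc c => if pvOpenGtClose c then acc + 1 else acc) (0:Int)
  simp only [zero_sub, sub_zero] at hdiff
  dsimp only
  rcases lt_trichotomy net 0 with h | h | h
  · have hb : ¬ b > r := by omega
    have hr : r > b := by omega
    obtain ⟨k, hk⟩ : ∃ k, (-net).toNat = k + 1 := ⟨(-net).toNat - 1, by omega⟩
    simp [pvRepr, show ¬ (0:Int) ≤ net by omega, hk, List.replicate_succ, hb, hr]
  · have hb : ¬ b > r := by omega
    have hr : ¬ r > b := by omega
    simp [pvRepr, h, hb, hr]
  · have hb : b > r := by omega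
    obtain ⟨k, hk⟩ : ∃ k, net.toNat = k + 1 := ⟨net.toNat - 1, by omega⟩
    simp [pvRepr, show (0:Int) ≤ net by omega, hk, List.replicate_succ, hb]
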